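-- pv_equiv track=rewrite | github.com/theholybull/GAIL-V2 | tools/_animoxtend_1_2_2_unpack/animoxtend/modules/blending/blending_functions/operator_funcs.py | find_discontinuities_simple
-- ===== SOURCE A (Python) =====
-- def find_discontinuities_simple(keyframe_list: list) -> tuple:
--     """
--     Identify discontinuities in a sorted list of keyframes.
--
--     Args:
--         keyframe_list (list): A list of integers representing keyframe indices.
--
--     Returns:
--         tuple:
--             pre_end (int): The last keyframe index before the first gap (discontinuity).
--             post_start (int): The first keyframe index after the last gap (discontinuity).
--             intermediate_values (list): A list of keyframe indices between the discontinuities.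
--
--     Example:
--         Input:
--             keyframe_list = [1, 2, 3, 7, 8, 12]
--         Output:
--             pre_end = 3, post_start = 12, intermediate_values = [7, 8]
--     """
--     # Ensure the keyframe list is sorted in ascending order
--     keyframe_list = sorted(keyframe_list)
--
--     idx1 = None  # forward search
--     idx2 = None  # backward search
--
--     # Forward search: Find the first gap in the sequence
--     for i in range(1, len(keyframe_list)):
--         if keyframe_list[i] - keyframe_list[i - 1] > 1:
--             idx1 = i - 1
--             break
--
--     # Backward search: Find the last gap in the sequence
--     for i in range(len(keyframe_list) - 1, 0, -1):
--         if keyframe_list[i] - keyframe_list[i - 1] > 1: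
--             idx2 = i
--             break
--
--     # Extract results based on identified discontinuities
--     if idx1 is not None and idx2 is not None:
--         pre_end = keyframe_list[idx1]
--         post_start = keyframe_list[idx2]
--         intermediate_values = keyframe_list[idx1 + 1 : idx2]
--     else:
--         pre_end, post_start, intermediate_values = None, None, []
--
--     return pre_end, post_start, intermediate_values
-- ===== SOURCE B (Python) =====
-- def find_discontinuities_simple(keyframe_list: list) -> tuple:
--     k = sorted(keyframe_list)
--     gaps = [i for i in range(1, len(k)) if k[i] - k[i - 1] > 1]
--     if not gaps:
--         return None, None, []
--     first, last = gaps[0], gaps[-1]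
--     return k[first - 1], k[last], k[first:last]
-- ===== Notes on version B (the rewrite author's own statement) =====
-- stated objective: simpler
-- what changed: Replaces the two early-terminating directional scans (forward for the first gap, backward for the last) by one forward pass that collects all gap indices and then picks the first and last of that list.
import Mathlib
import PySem

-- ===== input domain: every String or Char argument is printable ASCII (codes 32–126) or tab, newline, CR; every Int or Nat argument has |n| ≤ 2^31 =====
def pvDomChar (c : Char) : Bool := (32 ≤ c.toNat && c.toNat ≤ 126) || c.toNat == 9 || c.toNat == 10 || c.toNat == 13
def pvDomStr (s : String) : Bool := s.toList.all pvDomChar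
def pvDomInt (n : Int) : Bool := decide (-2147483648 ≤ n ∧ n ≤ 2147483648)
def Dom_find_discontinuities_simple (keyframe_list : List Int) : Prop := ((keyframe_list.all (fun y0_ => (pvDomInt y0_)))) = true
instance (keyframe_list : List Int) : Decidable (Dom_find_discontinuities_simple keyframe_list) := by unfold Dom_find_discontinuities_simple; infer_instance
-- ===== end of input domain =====

-- B replaces A's two early-terminating directional scans by one pass that collects all
-- gap indices and picks the first and last (objective: simpler).

-- ===== PORT A =====
-- forward search: first i in the index list with a gap, returning i - 1 (early break)
def fdFwd (s : List Int) : List Int → Option Int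
  | [] => none
  | i :: rest =>
    if PySem.List.pyGetD s i 0 - PySem.List.pyGetD s (i - 1) 0 > 1 then some (i - 1)
    else fdFwd s rest

-- backward search: first i in the (descending) index list with a gap, returning i (early break)
def fdBwd (s : List Int) : List Int → Option Int
  | [] => none
  | i :: rest =>
    if PySem.List.pyGetD s i 0 - PySem.List.pyGetD s (i - 1) 0 > 1 then some i
    else fdBwd s rest

def find_discontinuities_simple (keyframe_list : List Int) : Option Int × Option Int × List Int :=
  let s := PySem.List.sorted keyframe_list (fun x => x) false
  let idx1 := fdFwd s (PySem.List.pyRange 1 (s.length : Int) 1)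
  let idx2 := fdBwd s (PySem.List.pyRange ((s.length : Int) - 1) 0 (-1))
  match idx1, idx2 with
  | some i1, some i2 =>
    (some (PySem.List.pyGetD s i1 0), some (PySem.List.pyGetD s i2 0),
     PySem.List.slice s (some (i1 + 1)) (some i2))
  | _, _ => (none, none, [])

-- ===== PORT B =====
def find_discontinuities_simple_alt (keyframe_list : List Int) : Option Int × Option Int × List Int :=
  let s := PySem.List.sorted keyframe_list (fun x => x) false
  let gaps := (PySem.List.pyRange 1 (s.length : Int) 1).filter
    (fun i => decide (PySem.List.pyGetD s i 0 - PySem.List.pyGetD s (i - 1) 0 > 1))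
  match gaps with
  | [] => (none, none, [])
  | f :: rest =>
    let l := (f :: rest).getLast (by simp)
    (some (PySem.List.pyGetD s (f - 1) 0), some (PySem.List.pyGetD s l 0),
     PySem.List.slice s (some f) (some l))

-- ===== PRECONDITION & SPEC =====
def Spec_find_discontinuities_simple (keyframe_list : List Int) (out : Option Int × Option Int × List Int) : Prop := out = find_discontinuities_simple_alt keyframe_list
instance (keyframe_list : List Int) (out : Option Int × Option Int × List Int) : Decidable (Spec_find_discontinuities_simple keyframe_list out) := by unfold Spec_find_discontinuities_simple; infer_instance

-- ===== CLAIM (what is proved, stated in full; the proofs are below) =====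
def Claim_equal_find_discontinuities_simple : Prop := ∀ (keyframe_list : List Int), Dom_find_discontinuities_simple keyframe_list → Spec_find_discontinuities_simple keyframe_list (find_discontinuities_simple keyframe_list)

-- ===== LEMMAS AND PROOFS =====

theorem fdFwd_eq_filter (s : List Int) (r : List Int) :
    fdFwd s r = ((r.filter (fun i => decide (PySem.List.pyGetD s i 0 - PySem.List.pyGetD s (i - 1) 0 > 1))).head?).map (· - 1) := by
  induction r with
  | nil => rfl
  | cons i rest ih =>
    by_cases h : PySem.List.pyGetD s i 0 - PySem.List.pyGetD s (i - 1) 0 > 1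
    · simp [fdFwd, h]
    · simp [fdFwd, h, ih]

theorem fdBwd_eq_filter (s : List Int) (r : List Int) :
    fdBwd s r = (r.filter (fun i => decide (PySem.List.pyGetD s i 0 - PySem.List.pyGetD s (i - 1) 0 > 1))).head? := by
  induction r with
  | nil => rfl
  | cons i rest ih =>
    by_cases h : PySem.List.pyGetD s i 0 - PySem.List.pyGetD s (i - 1) 0 > 1
    · simp [fdBwd, h]
    · simp [fdBwd, h, ih]

-- ===== VERDICT (by name: the statement is the Claim_ definition above) =====
theorem find_discontinuities_simple_spec : Claim_equal_find_discontinuities_simple := by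
  intro kl _
  unfold Spec_find_discontinuities_simple find_discontinuities_simple find_discontinuities_simple_alt
  dsimp only
  set s := PySem.List.sorted kl (fun x => x) false with hs
  set p := (fun i => decide (PySem.List.pyGetD s i 0 - PySem.List.pyGetD s (i - 1) 0 > 1)) with hp
  have hrange : PySem.List.pyRange ((s.length : Int) - 1) 0 (-1)
      = (PySem.List.pyRange 1 (s.length : Int) 1).reverse := by
    rw [PySem.List.pyRange_neg_one_eq_reverse]
    norm_num
  have hbwd : fdBwd s (PySem.List.pyRange ((s.length : Int) - 1) 0 (-1))
      = ((PySem.List.pyRange 1 (s.length : Int) 1).filter p).getLast? := by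
    rw [hrange, fdBwd_eq_filter, List.filter_reverse, List.head?_reverse]
  rw [hbwd, fdFwd_eq_filter s]
  cases hg : (PySem.List.pyRange 1 (s.length : Int) 1).filter p with
  | nil => simp
  | cons f rest =>
    simp only [List.head?_cons, Option.map_some]
    rw [List.getLast?_eq_some_getLast (l := f :: rest) (by simp)]
    simp only []
    have : f - 1 + 1 = f := by ring
    rw [this]
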